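-- pv_equiv track=rewrite | github.com/green-gray-gaurav/Logic-Gate-Simulator-with-deep-learning-intergrated | util_functions.py | naiveSuggestion
-- ===== SOURCE A (Python) =====
-- def naiveSuggestion(word:str , keys):
--     def match_len(key):
--         matched = 0
--         for pair in zip(list(word) , list(key)):
--             if pair[0] == pair[1]:matched+=1
--             else:return matched
--             pass
--         return matched
--     suggestions = sorted(keys , key= match_len , reverse=True)
--     suggestions = list(filter( lambda k : match_len(k)!=0 , suggestions))
--     return suggestions
-- ===== SOURCE B (Python) =====
-- def naiveSuggestion(word: str, keys):
--     L = len(word)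
--     buckets = [[] for _ in range(L + 1)]
--     for key in keys:
--         m = 0
--         while m < L and m < len(key) and word[m] == key[m]:
--             m += 1
--         buckets[m].append(key)
--     out = []
--     for m in range(L, 0, -1):
--         out.extend(buckets[m])
--     return out
-- ===== Notes on version B (the rewrite author's own statement) =====
-- stated objective: faster
-- what changed: Replaces the comparison sort (sorted with key=match_len, reverse=True) followed by a filter pass by a single-pass bucket (counting) sort: each key's prefix-match length is computed once, keys are appended to buckets[match_len] in input order, and the output is the buckets for lengths len(word)..1 concatenated, which drops non-matches without a separate filter.
import Mathlib
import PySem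

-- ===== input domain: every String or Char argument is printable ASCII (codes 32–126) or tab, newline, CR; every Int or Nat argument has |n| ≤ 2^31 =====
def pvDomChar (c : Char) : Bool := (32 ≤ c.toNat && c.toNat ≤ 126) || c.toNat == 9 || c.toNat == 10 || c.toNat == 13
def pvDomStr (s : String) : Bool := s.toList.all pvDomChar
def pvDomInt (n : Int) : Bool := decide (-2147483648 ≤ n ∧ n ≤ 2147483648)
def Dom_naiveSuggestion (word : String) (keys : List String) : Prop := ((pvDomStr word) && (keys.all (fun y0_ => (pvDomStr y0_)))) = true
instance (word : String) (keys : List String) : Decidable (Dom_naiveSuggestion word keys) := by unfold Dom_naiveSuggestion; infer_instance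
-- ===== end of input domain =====

-- B replaces A's comparison sort + filter pass by a one-pass bucket (counting) sort on the
-- prefix-match length (objective: faster single pass instead of sorting).

-- ===== PORT A =====
-- A's inner match_len: fold over zip(word, key) with an accumulator, early return on mismatch.
def pvMatchLenA : List (Char × Char) → Int → Int
  | [], matched => matched
  | p :: rest, matched => if p.1 = p.2 then pvMatchLenA rest (matched + 1) else matched

def naiveSuggestion (word : String) (keys : List String) : List String :=
  let matchLen := fun (k : String) => pvMatchLenA (word.toList.zip k.toList) 0
  let suggestions := PySem.List.sorted keys matchLen true
  suggestions.filter (fun k => decide (matchLen k ≠ 0))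

-- ===== PORT B =====
-- B's while loop: advance m while m < len(word), m < len(key) and the chars agree.
def pvMatchLenB : List Char → List Char → Nat
  | w :: ws, k :: ks => if w = k then pvMatchLenB ws ks + 1 else 0
  | _, _ => 0

def naiveSuggestion_alt (word : String) (keys : List String) : List String :=
  let L := word.toList.length
  let buckets := keys.foldl
    (fun bs k =>
      let m := pvMatchLenB word.toList k.toList
      bs.set m (bs.getD m [] ++ [k]))
    (List.replicate (L + 1) [])
  (PySem.List.pyRange (L : Int) 0 (-1)).foldl (fun out m => out ++ buckets.getD m.toNat []) []

-- ===== PRECONDITION & SPEC =====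
def Spec_naiveSuggestion (word : String) (keys : List String) (out : List String) : Prop := out = naiveSuggestion_alt word keys
instance (word : String) (keys : List String) (out : List String) : Decidable (Spec_naiveSuggestion word keys out) := by unfold Spec_naiveSuggestion; infer_instance

-- ===== CLAIM (what is proved, stated in full; the proofs are below) =====
def Claim_equal_naiveSuggestion : Prop := ∀ (word : String) (keys : List String), Dom_naiveSuggestion word keys → Spec_naiveSuggestion word keys (naiveSuggestion word keys)

-- ===== LEMMAS AND PROOFS =====

-- the descending index list [n, n-1, …, 1, 0]
def pvCdown : Nat → List Nat
  | 0 => [0]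
  | n + 1 => (n + 1) :: pvCdown n

-- the bucket concatenation both sides are reduced to
def pvD (g : String → Nat) (ms : List Nat) (ys : List String) : List String :=
  ms.flatMap (fun m => ys.filter (fun x => g x == m))

theorem pvMatchLenA_zip (ws ks : List Char) (c : Int) :
    pvMatchLenA (ws.zip ks) c = c + (pvMatchLenB ws ks : Int) := by
  induction ws generalizing ks c with
  | nil => simp [pvMatchLenA, pvMatchLenB]
  | cons w ws ih =>
    cases ks with
    | nil => simp [pvMatchLenA, pvMatchLenB]
    | cons k ks =>
      by_cases h : w = k <;> simp [pvMatchLenA, pvMatchLenB, h, ih]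
      ring

theorem pvMatchLenB_le (ws ks : List Char) : pvMatchLenB ws ks ≤ ws.length := by
  induction ws generalizing ks with
  | nil => simp [pvMatchLenB]
  | cons w ws ih =>
    cases ks with
    | nil => simp [pvMatchLenB]
    | cons k ks =>
      by_cases h : w = k <;> simp [pvMatchLenB, h]
      exact ih ks

theorem pvMem_cdown {m n : Nat} (h : m ≤ n) : m ∈ pvCdown n := by
  induction n with
  | zero => interval_cases m; simp [pvCdown]
  | succ n ih =>
    rcases Nat.lt_or_ge m (n + 1) with h' | h'
    · exact List.mem_cons_of_mem _ (ih (Nat.lt_succ_iff.mp h'))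
    · have : m = n + 1 := le_antisymm h h'
      simp [pvCdown, this]

theorem pvCdown_lt {m n : Nat} (h : m ∈ pvCdown n) : m ≤ n := by
  induction n with
  | zero => simpa [pvCdown] using h
  | succ n ih =>
    rcases (by simpa [pvCdown] using h : m = n + 1 ∨ m ∈ pvCdown n) with h | h
    · omega
    · exact le_trans (ih h) (by omega)

-- skip a block of elements none of which triggers insertion
theorem pvInsertBy_append (before : String → String → Bool) (x : String) (as bs : List String)
    (h : ∀ y ∈ as, before x y = false) :
    PySem.List.insertBy before x (as ++ bs) = as ++ PySem.List.insertBy before x bs := by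
  induction as with
  | nil => rfl
  | cons a as ih =>
    have ha : before x a = false := h a (by simp)
    simp only [List.cons_append, PySem.List.insertBy, ha]
    simp [ih (fun y hy => h y (by simp [hy]))]

theorem pvInsertBy_front (before : String → String → Bool) (x : String) (l : List String)
    (h : ∀ y ∈ l, before x y = true) :
    PySem.List.insertBy before x l = x :: l := by
  cases l with
  | nil => rfl
  | cons a l => simp [PySem.List.insertBy, h a (by simp)]

theorem pvD_append_not_mem (g : String → Nat) (ms : List Nat) (ys : List String) (x : String)
    (h : g x ∉ ms) : pvD g ms (ys ++ [x]) = pvD g ms ys := by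
  unfold pvD
  apply List.flatMap_congr
  intro m hm
  have : (g x == m) = false := by simp; rintro rfl; exact h hm
  simp [List.filter_append, this]

theorem pvInsert_D (g : String → Nat) (x : String) (ms : List Nat) (ys : List String)
    (hmem : g x ∈ ms) (hsort : ms.Pairwise (· > ·)) :
    PySem.List.insertBy (fun a b => decide ((g b : Int) < (g a : Int))) x (pvD g ms ys)
      = pvD g ms (ys ++ [x]) := by
  induction ms with
  | nil => cases hmem
  | cons m rest ih =>
    have hrest : ∀ m' ∈ rest, m' < m := by
      intro m' hm'; exact (List.pairwise_cons.mp hsort).1 m' hm'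
    unfold pvD
    simp only [List.flatMap_cons]
    by_cases hx : g x = m
    · -- insert at the end of bucket m, before everything in the lower buckets
      have hskip : ∀ y ∈ ys.filter (fun z => g z == m),
          (decide ((g y : Int) < (g x : Int))) = false := by
        intro y hy
        have : g y = m := by simpa using (List.mem_filter.mp hy).2
        simp [this, hx]
      rw [pvInsertBy_append _ _ _ _ hskip]
      have hfront : ∀ y ∈ rest.flatMap (fun m' => ys.filter (fun z => g z == m')),
          (decide ((g y : Int) < (g x : Int))) = true := by
        intro y hy
        rcases List.mem_flatMap.mp hy with ⟨m', hm', hy'⟩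
        have : g y = m' := by simpa using (List.mem_filter.mp hy').2
        have : g y < g x := by rw [this, hx]; exact hrest m' hm'
        simpa using this
      rw [pvInsertBy_front _ _ _ hfront]
      have hnot : g x ∉ rest := by
        intro hc; exact absurd (hrest _ hc) (by omega)
      have := pvD_append_not_mem g rest ys x hnot
      unfold pvD at this
      rw [this, List.filter_append]
      simp [hx]
    · -- bucket m untouched; recurse into the lower buckets
      have hmem' : g x ∈ rest := by
        rcases List.mem_cons.mp hmem with h | h
        · exact absurd h hx
        · exact h
      have hskip : ∀ y ∈ ys.filter (fun z => g z == m),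
          (decide ((g y : Int) < (g x : Int))) = false := by
        intro y hy
        have hgy : g y = m := by simpa using (List.mem_filter.mp hy).2
        have : g x < m := hrest _ hmem'
        simp [hgy]; omega
      rw [pvInsertBy_append _ _ _ _ hskip]
      have := ih hmem' (List.pairwise_cons.mp hsort).2
      unfold pvD at this
      rw [this, List.filter_append]
      simp [hx]

theorem pvCdown_pairwise (n : Nat) : (pvCdown n).Pairwise (· > ·) := by
  induction n with
  | zero => simp [pvCdown]
  | succ n ih =>
    refine List.pairwise_cons.mpr ⟨?_, ih⟩
    intro m hm
    exact Nat.lt_succ_of_le (pvCdown_lt hm)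

-- A's sorted list is the descending bucket concatenation
theorem pvSorted_eq_D (g : String → Nat) (L : Nat) (ys : List String)
    (hb : ∀ x ∈ ys, g x ≤ L) :
    PySem.List.sorted ys (fun k => (g k : Int)) true = pvD g (pvCdown L) ys := by
  rw [PySem.List.sorted_rev_eq_foldl_insertBy]
  induction ys using List.reverseRecOn with
  | nil => simp [pvD]
  | append_singleton ys x ih =>
    rw [List.foldl_append, List.foldl_cons, List.foldl_nil,
        ih (fun z hz => hb z (by simp [hz]))]
    exact pvInsert_D g x (pvCdown L) ys (pvMem_cdown (hb x (by simp)))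
      (pvCdown_pairwise L)

-- filtering out the zero bucket
theorem pvA_eq_buckets (g : String → Nat) (L : Nat) (ys : List String)
    (hb : ∀ x ∈ ys, g x ≤ L) :
    (PySem.List.sorted ys (fun k => (g k : Int)) true).filter
        (fun k => decide ((g k : Int) ≠ 0))
      = (pvCdown L).flatMap
          (fun m => if m = 0 then [] else ys.filter (fun x => g x == m)) := by
  rw [pvSorted_eq_D g L ys hb]
  unfold pvD
  rw [List.filter_flatMap]
  apply List.flatMap_congr
  intro m _
  by_cases hm : m = 0
  · subst hm
    rw [if_pos rfl]
    apply List.filter_eq_nil_iff.mpr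
    intro y hy
    have : g y = 0 := by simpa using (List.mem_filter.mp hy).2
    simp [this]
  · rw [if_neg hm]
    apply List.filter_eq_self.mpr
    intro y hy
    have : g y = m := by simpa using (List.mem_filter.mp hy).2
    simp [this, hm]

-- B's bucket table after the first loop
theorem pvBuckets_eq (g : String → Nat) (L : Nat) (ys : List String)
    (hb : ∀ x ∈ ys, g x ≤ L) :
    ys.foldl (fun bs k => bs.set (g k) (bs.getD (g k) [] ++ [k]))
        (List.replicate (L + 1) [])
      = (List.range (L + 1)).map (fun m => ys.filter (fun x => g x == m)) := by
  induction ys using List.reverseRecOn with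
  | nil =>
    apply List.ext_getElem (by simp)
    intro i h1 h2
    simp at h1 ⊢
  | append_singleton ys x ih =>
    rw [List.foldl_append, List.foldl_cons, List.foldl_nil,
        ih (fun z hz => hb z (by simp [hz]))]
    have hx : g x < L + 1 := Nat.lt_succ_of_le (hb x (by simp))
    apply List.ext_getElem (by simp)
    intro i h1 h2
    simp only [List.length_set, List.length_map, List.length_range] at h1
    rw [List.getElem_set]
    by_cases hi : g x = i
    · subst hi
      simp [List.getElem_map, List.getElem_range, List.filter_append, hx]
    · simp only [if_neg hi, List.getElem_map, List.getElem_range, List.filter_append]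
      have : (g x == i) = false := by simpa using hi
      simp [this]

-- B's output loop over range(L, 0, -1) versus the cdown flatMap
theorem pvBout_eq (bucket : Nat → List String) (n : Nat) :
    (PySem.List.pyRange (n : Int) 0 (-1)).flatMap (fun m => bucket m.toNat)
      = (pvCdown n).flatMap (fun m => if m = 0 then [] else bucket m) := by
  induction n with
  | zero => simp [PySem.List.pyRange_neg_one_eq_nil, pvCdown]
  | succ n ih =>
    have hcons : PySem.List.pyRange ((n + 1 : Nat) : Int) 0 (-1)
        = ((n + 1 : Nat) : Int) :: PySem.List.pyRange (((n + 1 : Nat) : Int) - 1) 0 (-1) :=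
      PySem.List.pyRange_neg_one_cons (by positivity)
    have harg : ((n + 1 : Nat) : Int) - 1 = (n : Int) := by push_cast; ring
    rw [hcons, harg, List.flatMap_cons, ih]
    simp [pvCdown]

-- ===== VERDICT (by name: the statement is the Claim_ definition above) =====
theorem naiveSuggestion_spec : Claim_equal_naiveSuggestion := by
  intro word keys _
  unfold Spec_naiveSuggestion naiveSuggestion naiveSuggestion_alt
  set g := fun k : String => pvMatchLenB word.toList k.toList with hg
  set L := word.toList.length with hL
  have hb : ∀ x ∈ keys, g x ≤ L := fun x _ => pvMatchLenB_le _ _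
  have hf : ∀ k : String, pvMatchLenA (word.toList.zip k.toList) 0 = (g k : Int) := by
    intro k; rw [pvMatchLenA_zip]; ring
  simp only [hf]
  rw [pvA_eq_buckets g L keys hb, pvBuckets_eq g L keys hb,
      PySem.List.foldl_append_eq_flatMap, List.nil_append,
      pvBout_eq (fun j => ((List.range (L + 1)).map
        (fun m => keys.filter (fun x => g x == m))).getD j []) L]
  apply List.flatMap_congr
  intro m hm
  have hm' : m ≤ L := pvCdown_lt hm
  by_cases h0 : m = 0
  · simp [h0]
  · rw [if_neg h0, if_neg h0]
    have : m < L + 1 := by omega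
    rw [List.getD_eq_getElem _ _ (by simpa using this)]
    simp [List.getElem_map, List.getElem_range]
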